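-- pv_equiv track=rewrite | github.com/tengu-team/layer-sojobo | files/sojobo_api/api/w_juju.py | get_machine_ip
-- ===== SOURCE A (Python) =====
-- def get_machine_ip(machine_data):
--     mach_ips = {'internal_ip' : 'unknown', 'external_ip' : 'unknown'}
--     if machine_data['addresses'] is None:
--         return mach_ips
--     for machine in machine_data['addresses']:
--         if machine['scope'] == 'public':
--             mach_ips['external_ip'] = machine['value']
--         elif machine['scope'] == 'local-cloud':
--             mach_ips['internal_ip'] = machine['value']
--     return mach_ips
-- ===== SOURCE B (Python) =====
-- def _last_value(addresses, scope):
--     # last matching value wins, so scan in reverse and return the first hit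
--     for machine in reversed(addresses):
--         if machine['scope'] == scope:
--             return machine['value']
--     return 'unknown'
--
-- def get_machine_ip(machine_data):
--     addresses = machine_data['addresses']
--     if addresses is None:
--         return {'internal_ip': 'unknown', 'external_ip': 'unknown'}
--     return {'internal_ip': _last_value(addresses, 'local-cloud'),
--             'external_ip': _last_value(addresses, 'public')}
-- ===== Notes on version B (the rewrite author's own statement) =====
-- stated objective: simpler
-- what changed: Replaces the single interleaved last-write-wins loop that mutates a dict with two independent reverse scans (one per scope) that each return the first match, then builds the result dict once.
import Mathlib
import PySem

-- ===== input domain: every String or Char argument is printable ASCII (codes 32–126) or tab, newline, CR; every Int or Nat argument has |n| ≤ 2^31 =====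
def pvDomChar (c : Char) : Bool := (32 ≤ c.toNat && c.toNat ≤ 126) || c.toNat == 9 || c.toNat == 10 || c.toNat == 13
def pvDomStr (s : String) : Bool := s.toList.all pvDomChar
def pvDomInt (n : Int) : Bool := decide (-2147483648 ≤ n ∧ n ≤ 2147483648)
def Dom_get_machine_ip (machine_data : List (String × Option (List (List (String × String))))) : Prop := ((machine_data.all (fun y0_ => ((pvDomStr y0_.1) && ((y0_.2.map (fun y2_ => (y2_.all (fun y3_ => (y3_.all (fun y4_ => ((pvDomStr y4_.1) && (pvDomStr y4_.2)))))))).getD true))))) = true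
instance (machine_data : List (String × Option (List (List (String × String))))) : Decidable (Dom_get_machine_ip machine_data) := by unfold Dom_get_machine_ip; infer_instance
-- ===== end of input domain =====

-- B replaces A's single interleaved dict-mutating loop by two independent reverse scans, one per scope (objective: simpler).

-- ===== PORT A =====
-- machine['scope'] / machine['value'] : Python dict lookup on the inner association lists
def pvGet (m : List (String × String)) (k : String) : Option String :=
  (PySem.Dict.mk m).get? k

-- one iteration of A's for-loop; the Option state is `none` once a KeyError occurred
def pvStepA (st : Option (PySem.Dict String String)) (machine : List (String × String)) :
    Option (PySem.Dict String String) :=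
  match st with
  | none => none
  | some d =>
    match pvGet machine "scope" with
    | none => none  -- KeyError on machine['scope']; excluded by Pre_
    | some s =>
      if s == "public" then (pvGet machine "value").map (fun v => d.insert "external_ip" v)
      else if s == "local-cloud" then (pvGet machine "value").map (fun v => d.insert "internal_ip" v)
      else some d

def get_machine_ip (machine_data : List (String × Option (List (List (String × String))))) : List (String × String) :=
  let mach_ips : PySem.Dict String String :=
    ((PySem.Dict.empty).insert "internal_ip" "unknown").insert "external_ip" "unknown"
  match (PySem.Dict.mk machine_data).get? "addresses" with
  | none => []  -- KeyError on machine_data['addresses']; excluded by Pre_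
  | some none => mach_ips.items
  | some (some addrs) =>
    match addrs.foldl pvStepA (some mach_ips) with
    | none => []  -- KeyError inside the loop; excluded by Pre_
    | some d => d.items

-- ===== PORT B =====
-- _last_value: scan in reverse, return the first match; `none` = KeyError (excluded by Pre_)
def pvNextVal (scope : String) : List (List (String × String)) → Option String
  | [] => some "unknown"
  | m :: rest =>
    match pvGet m "scope" with
    | none => none
    | some s => if s == scope then pvGet m "value" else pvNextVal scope rest

def pvLastValue (addresses : List (List (String × String))) (scope : String) : Option String :=
  pvNextVal scope addresses.reverse

def get_machine_ip_alt (machine_data : List (String × Option (List (List (String × String))))) : List (String × String) :=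
  match (PySem.Dict.mk machine_data).get? "addresses" with
  | none => []  -- KeyError; excluded by Pre_
  | some none => [("internal_ip", "unknown"), ("external_ip", "unknown")]
  | some (some addrs) =>
    match pvLastValue addrs "local-cloud", pvLastValue addrs "public" with
    | some i, some e => [("internal_ip", i), ("external_ip", e)]
    | _, _ => []  -- KeyError; excluded by Pre_

-- ===== PRECONDITION & SPEC =====
-- Pre_ excludes exactly the KeyError inputs: machine_data must have an 'addresses' key, every
-- address dict must have a 'scope' key, and every address whose scope is 'public' or
-- 'local-cloud' must have a 'value' key.  On all other inputs A raises KeyError.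
def pvMachineOk (m : List (String × String)) : Bool :=
  (pvGet m "scope").isSome &&
    (!(pvGet m "scope" == some "public" || pvGet m "scope" == some "local-cloud")
      || (pvGet m "value").isSome)

def Pre_get_machine_ip (machine_data : List (String × Option (List (List (String × String))))) : Prop :=
  (match (PySem.Dict.mk machine_data).get? "addresses" with
   | none => false
   | some none => true
   | some (some addrs) => addrs.all pvMachineOk) = true

instance (machine_data : List (String × Option (List (List (String × String))))) : Decidable (Pre_get_machine_ip machine_data) := by unfold Pre_get_machine_ip; infer_instance

def pvWitness_get_machine_ip : (List (String × Option (List (List (String × String))))) :=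
  [("addresses", some [[("scope", "public"), ("value", "1.2.3.4")], [("scope", "local-cloud"), ("value", "10.0.0.1")]])]

def Spec_get_machine_ip (machine_data : List (String × Option (List (List (String × String))))) (out : List (String × String)) : Prop := out = get_machine_ip_alt machine_data
instance (machine_data : List (String × Option (List (List (String × String))))) (out : List (String × String)) : Decidable (Spec_get_machine_ip machine_data out) := by unfold Spec_get_machine_ip; infer_instance

-- ===== CLAIM (what is proved, stated in full; the proofs are below) =====
def Claim_equal_get_machine_ip : Prop := ∀ (machine_data : List (String × Option (List (List (String × String))))), Dom_get_machine_ip machine_data → Pre_get_machine_ip machine_data → Spec_get_machine_ip machine_data (get_machine_ip machine_data)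

-- ===== LEMMAS AND PROOFS =====

-- functional model of one iteration of A's loop on the pair (internal, external)
def pvF2 (p : String × String) (m : List (String × String)) : String × String :=
  let s := (pvGet m "scope").getD ""
  if s == "public" then (p.1, (pvGet m "value").getD "")
  else if s == "local-cloud" then ((pvGet m "value").getD "", p.2)
  else p

-- last matching value for one scope, scanning forwards with an accumulator
def pvG (scope : String) (l : List (List (String × String))) (d : String) : String :=
  l.foldl (fun acc m => if (pvGet m "scope").getD "" == scope then (pvGet m "value").getD "" else acc) d

def pvHas (scope : String) (l : List (List (String × String))) : Bool :=
  l.any (fun m => (pvGet m "scope").getD "" == scope)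

lemma pvFold_fst (l : List (List (String × String))) :
    ∀ i e : String, (l.foldl pvF2 (i, e)).1 = pvG "local-cloud" l i := by
  induction l with
  | nil => intro i e; rfl
  | cons m t ih =>
    intro i e
    by_cases h1 : (pvGet m "scope").getD "" = "public" <;>
      by_cases h2 : (pvGet m "scope").getD "" = "local-cloud" <;>
      simp_all [pvF2, pvG]

lemma pvFold_snd (l : List (List (String × String))) :
    ∀ i e : String, (l.foldl pvF2 (i, e)).2 = pvG "public" l e := by
  induction l with
  | nil => intro i e; rfl
  | cons m t ih =>
    intro i e
    by_cases h1 : (pvGet m "scope").getD "" = "public" <;>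
      by_cases h2 : (pvGet m "scope").getD "" = "local-cloud" <;>
      simp_all [pvF2, pvG]


lemma pvG_cons (scope : String) (m : List (String × String)) (t : List (List (String × String))) (d : String) :
    pvG scope (m :: t) d
      = pvG scope t (if (pvGet m "scope").getD "" == scope then (pvGet m "value").getD "" else d) := rfl

lemma pvG_not_has (scope : String) (l : List (List (String × String))) (d : String)
    (h : pvHas scope l = false) : pvG scope l d = d := by
  induction l generalizing d with
  | nil => rfl
  | cons m t ih =>
    simp [pvHas] at h
    rw [pvG_cons, if_neg (by simp [h.1]), ih d (by simp [pvHas]; exact h.2)]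

lemma pvG_indep (scope : String) (l : List (List (String × String))) (d d' : String)
    (h : pvHas scope l = true) : pvG scope l d = pvG scope l d' := by
  induction l generalizing d d' with
  | nil => simp [pvHas] at h
  | cons m t ih =>
    by_cases h1 : (pvGet m "scope").getD "" = scope
    · rw [pvG_cons, pvG_cons, if_pos (by simp [h1]), if_pos (by simp [h1])]
    · simp [pvHas, h1] at h
      rw [pvG_cons, pvG_cons, if_neg (by simp [h1]), if_neg (by simp [h1])]
      exact ih _ _ (by simp [pvHas]; exact h)

lemma pvNextVal_append (scope : String) (l1 l2 : List (List (String × String)))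
    (h : ∀ m ∈ l1, (pvGet m "scope").isSome = true) :
    pvNextVal scope (l1 ++ l2)
      = if pvHas scope l1 then pvNextVal scope l1 else pvNextVal scope l2 := by
  induction l1 with
  | nil => simp [pvHas]
  | cons m t ih =>
    obtain ⟨s, hs⟩ := Option.isSome_iff_exists.mp (h m (by simp))
    have ht := ih (fun m hm => h m (by simp [hm]))
    by_cases h1 : s = scope
    · simp [pvNextVal, pvHas, hs, h1]
    · simp [pvNextVal, pvHas, hs, h1, ht]

lemma pvNextVal_reverse (scope : String) (l : List (List (String × String)))
    (hsc : scope = "public" ∨ scope = "local-cloud")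
    (h : ∀ m ∈ l, pvMachineOk m = true) :
    pvNextVal scope l.reverse = some (pvG scope l "unknown") := by
  induction l with
  | nil => rfl
  | cons m t ih =>
    have hm := h m (by simp)
    have ht := ih (fun m hm => h m (by simp [hm]))
    have hssome : (pvGet m "scope").isSome = true := by
      simp [pvMachineOk] at hm; exact hm.1
    obtain ⟨s, hs⟩ := Option.isSome_iff_exists.mp hssome
    rw [show (m :: t).reverse = t.reverse ++ [m] by simp,
        pvNextVal_append scope t.reverse [m] (by
          intro x hx
          have := h x (by simp at hx; simp [hx])
          simp [pvMachineOk] at this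
          exact this.1)]
    have hhas : pvHas scope t.reverse = pvHas scope t := by simp [pvHas]
    by_cases hh : pvHas scope t = true
    · rw [if_pos (by rw [hhas]; exact hh), ht, pvG_cons]
      exact congrArg some (pvG_indep scope t _ _ hh)
    · have hh' : pvHas scope t = false := by simp at hh; exact hh
      rw [if_neg (by rw [hhas, hh']; simp)]
      by_cases h1 : s = scope
      · have hv : (pvGet m "value").isSome = true := by
          simp [pvMachineOk, hs] at hm
          rcases hm with ⟨ha, hb⟩ | hv
          · rcases hsc with rfl | rfl
            · exact absurd h1 ha
            · exact absurd h1 hb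
          · exact hv
        obtain ⟨v, hv⟩ := Option.isSome_iff_exists.mp hv
        simp [pvNextVal, hs, h1, hv]
        rw [pvG_cons, if_pos (by simp [hs, h1]), pvG_not_has scope t _ hh', hv]
        rfl
      · simp [pvNextVal, hs, h1]
        rw [pvG_cons, if_neg (by simp [hs, h1]), pvG_not_has scope t _ hh']

def pvD (i e : String) : PySem.Dict String String :=
  ((PySem.Dict.empty).insert "internal_ip" i).insert "external_ip" e

lemma pvFoldA (l : List (List (String × String))) (h : ∀ m ∈ l, pvMachineOk m = true) :
    ∀ i e : String,
      l.foldl pvStepA (some (pvD i e))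
        = some (pvD (l.foldl pvF2 (i, e)).1 (l.foldl pvF2 (i, e)).2) := by
  induction l with
  | nil => intro i e; rfl
  | cons m t ih =>
    intro i e
    have hm := h m (by simp)
    have ht := ih (fun x hx => h x (by simp [hx]))
    obtain ⟨s, hs⟩ := Option.isSome_iff_exists.mp (by simp [pvMachineOk] at hm; exact hm.1)
    simp only [List.foldl_cons]
    by_cases h1 : s = "public"
    · obtain ⟨v, hv⟩ : ∃ v, pvGet m "value" = some v := by
        simp [pvMachineOk, hs] at hm
        rcases hm with ⟨ha, _⟩ | hv
        · exact absurd h1 ha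
        · exact Option.isSome_iff_exists.mp hv
      have e1 : pvStepA (some (pvD i e)) m = some (pvD i v) := by
        simp [pvStepA, hs, h1, hv]; rfl
      have e2 : pvF2 (i, e) m = (i, v) := by simp [pvF2, hs, h1, hv]
      rw [e1, e2, ht i v]
    · by_cases h2 : s = "local-cloud"
      · obtain ⟨v, hv⟩ : ∃ v, pvGet m "value" = some v := by
          simp [pvMachineOk, hs] at hm
          rcases hm with ⟨_, hb⟩ | hv
          · exact absurd h2 hb
          · exact Option.isSome_iff_exists.mp hv
        have e1 : pvStepA (some (pvD i e)) m = some (pvD v e) := by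
          simp [pvStepA, hs, h2, hv]; rfl
        have e2 : pvF2 (i, e) m = (v, e) := by simp [pvF2, hs, h2, hv]
        rw [e1, e2, ht v e]
      · have e1 : pvStepA (some (pvD i e)) m = some (pvD i e) := by
          simp [pvStepA, hs, h1, h2]
        have e2 : pvF2 (i, e) m = (i, e) := by simp [pvF2, hs, h1, h2]
        rw [e1, e2, ht i e]

-- ===== VERDICT (by name: the statement is the Claim_ definition above) =====
theorem get_machine_ip_spec : Claim_equal_get_machine_ip := by
  intro md _ hpre
  unfold Pre_get_machine_ip at hpre
  unfold Spec_get_machine_ip get_machine_ip get_machine_ip_alt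
  cases hA : (PySem.Dict.mk md).get? "addresses" with
  | none => rw [hA] at hpre
  | some o =>
    cases o with
    | none => rfl
    | some addrs =>
      rw [hA] at hpre
      have hok : ∀ m ∈ addrs, pvMachineOk m = true := by
        simpa [List.all_eq_true] using hpre
      show (match addrs.foldl pvStepA (some (pvD "unknown" "unknown")) with
            | none => ([] : List (String × String))
            | some d => d.items)
          = (match pvLastValue addrs "local-cloud", pvLastValue addrs "public" with
            | some i, some e => [("internal_ip", i), ("external_ip", e)]
            | _, _ => [])
      rw [pvFoldA addrs hok "unknown" "unknown"]
      unfold pvLastValue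
      rw [pvNextVal_reverse "local-cloud" addrs (Or.inr rfl) hok,
          pvNextVal_reverse "public" addrs (Or.inl rfl) hok,
          pvFold_fst, pvFold_snd]
      rfl
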